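-- pv_equiv track=rewrite | github.com/PaddlePaddle/PaddleNLP | model_zoo/ernie-health/cblue/utils.py | extract_chunk
-- ===== SOURCE A (Python) =====
-- def extract_chunk(sequence, cid=0):
--     chunks = set()
--
--     start_idx, cur_idx = 0, 0
--     while cur_idx < len(sequence):
--         if sequence[cur_idx][0] == 'B':
--             start_idx = cur_idx
--             cur_idx += 1
--             while cur_idx < len(sequence) and sequence[cur_idx][0] == 'I':
--                 if sequence[cur_idx][2:] == sequence[start_idx][2:]:
--                     cur_idx += 1
--                 else:
--                     break
--             if cur_idx < len(sequence) and sequence[cur_idx][0] == 'E':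
--                 if sequence[cur_idx][2:] == sequence[start_idx][2:]:
--                     chunks.add(
--                         (cid, sequence[cur_idx][2:], start_idx, cur_idx))
--                     cur_idx += 1
--         elif sequence[cur_idx][0] == 'S':
--             chunks.add((cid, sequence[cur_idx][2:], cur_idx, cur_idx))
--             cur_idx += 1
--         else:
--             cur_idx += 1
--
--     return chunks
-- ===== SOURCE B (Python) =====
-- def extract_chunk(sequence, cid=0):
--     chunks = set()
--     in_chunk = False
--     start_idx = 0
--     tag = ''
--     for idx, tok in enumerate(sequence):
--         head = tok[0]
--         if in_chunk:
--             if head == 'I' and tok[2:] == tag: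
--                 continue
--             if head == 'E' and tok[2:] == tag:
--                 chunks.add((cid, tag, start_idx, idx))
--                 in_chunk = False
--                 continue
--             in_chunk = False
--         if head == 'B':
--             in_chunk = True
--             start_idx = idx
--             tag = tok[2:]
--         elif head == 'S':
--             chunks.add((cid, tok[2:], idx, idx))
--     return chunks
-- ===== Notes on version B (the rewrite author's own statement) =====
-- stated objective: simpler
-- what changed: Replaced the outer-while with a nested index-advancing inner-while by a single for-loop over enumerate(sequence) driving a finite state machine (in_chunk, start_idx, tag), with fall-through reprocessing of a chunk-breaking token.
import Mathlib
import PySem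

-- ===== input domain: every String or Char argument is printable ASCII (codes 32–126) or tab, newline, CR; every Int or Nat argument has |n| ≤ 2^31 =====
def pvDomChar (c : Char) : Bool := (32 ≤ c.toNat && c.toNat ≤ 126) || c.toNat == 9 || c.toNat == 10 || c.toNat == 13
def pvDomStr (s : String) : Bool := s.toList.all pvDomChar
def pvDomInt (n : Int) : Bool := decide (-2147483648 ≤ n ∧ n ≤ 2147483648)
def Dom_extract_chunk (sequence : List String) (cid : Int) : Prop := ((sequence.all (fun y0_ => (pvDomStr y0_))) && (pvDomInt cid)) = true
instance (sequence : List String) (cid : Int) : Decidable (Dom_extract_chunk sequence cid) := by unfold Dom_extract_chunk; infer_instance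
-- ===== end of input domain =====

-- B replaces A's outer-while + nested inner-while index machine by one for-loop over
-- enumerate(sequence) driving a finite state machine (in_chunk, start_idx, tag); same O(n), simpler.

-- ===== PORT A =====
-- tok[0]  (none = IndexError on the empty string, excluded by Pre_)
def ecHead (tok : String) : Option Char := PySem.Str.pyGet? tok 0
-- tok[2:]
def ecTag (tok : String) : String := PySem.Str.slice tok (some 2) none

-- A's inner while: advance cur over 'I' tokens whose tag matches.  The fuel argument is a
-- totality guard only: cur grows by 1 per step, so fuel = seq.length never runs out.
def ecInner (seq : List String) (tag : String) : Nat → Nat → Nat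
  | 0, cur => cur
  | fuel + 1, cur =>
    if h : cur < seq.length then
      if ecHead seq[cur] = some 'I' then
        if ecTag seq[cur] = tag then ecInner seq tag fuel (cur + 1) else cur
      else cur
    else cur

-- A's outer while loop (start_idx = cur when a 'B' is seen, so 'cur' plays start_idx's role).
-- fuel is again only a totality guard: cur advances by at least 1 per iteration.
def ecLoop (seq : List String) (cid : Int) :
    Nat → Nat → List (Int × String × Int × Int) → List (Int × String × Int × Int)
  | 0, _, chunks => chunks
  | fuel + 1, cur, chunks =>
    if h : cur < seq.length then
      if ecHead seq[cur] = some 'B' then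
        if h2 : ecInner seq (ecTag seq[cur]) seq.length (cur + 1) < seq.length then
          if ecHead seq[ecInner seq (ecTag seq[cur]) seq.length (cur + 1)] = some 'E' ∧
              ecTag seq[ecInner seq (ecTag seq[cur]) seq.length (cur + 1)] = ecTag seq[cur] then
            ecLoop seq cid fuel (ecInner seq (ecTag seq[cur]) seq.length (cur + 1) + 1)
              (PySem.Set.add chunks
                (cid, ecTag seq[ecInner seq (ecTag seq[cur]) seq.length (cur + 1)], (cur : Int),
                 (ecInner seq (ecTag seq[cur]) seq.length (cur + 1) : Int)))
          else ecLoop seq cid fuel (ecInner seq (ecTag seq[cur]) seq.length (cur + 1)) chunks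
        else ecLoop seq cid fuel (ecInner seq (ecTag seq[cur]) seq.length (cur + 1)) chunks
      else if ecHead seq[cur] = some 'S' then
        ecLoop seq cid fuel (cur + 1)
          (PySem.Set.add chunks (cid, ecTag seq[cur], (cur : Int), (cur : Int)))
      else ecLoop seq cid fuel (cur + 1) chunks
    else chunks

def extract_chunk (sequence : List String) (cid : Int) : List (Int × String × Int × Int) :=
  ecLoop sequence cid sequence.length 0 []

-- ===== PORT B =====
-- B's not-in-chunk handling (the code after the fall-through point in Source B)
def ecEnter (cid idx : Int) (tok : String) (start : Int) (tag : String)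
    (chunks : List (Int × String × Int × Int)) :
    Bool × Int × String × List (Int × String × Int × Int) :=
  if ecHead tok = some 'B' then (true, idx, ecTag tok, chunks)
  else if ecHead tok = some 'S' then
    (false, start, tag, PySem.Set.add chunks (cid, ecTag tok, idx, idx))
  else (false, start, tag, chunks)

-- one iteration of B's for-loop over (idx, tok)
def ecStep (cid : Int) :
    Bool × Int × String × List (Int × String × Int × Int) → Int × String →
      Bool × Int × String × List (Int × String × Int × Int)
  | (inch, start, tag, chunks), (idx, tok) =>
    if inch then
      if ecHead tok = some 'I' ∧ ecTag tok = tag then (true, start, tag, chunks)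
      else if ecHead tok = some 'E' ∧ ecTag tok = tag then
        (false, start, tag, PySem.Set.add chunks (cid, tag, start, idx))
      else ecEnter cid idx tok start tag chunks
    else ecEnter cid idx tok start tag chunks

def extract_chunk_alt (sequence : List String) (cid : Int) : List (Int × String × Int × Int) :=
  ((PySem.List.enumerate sequence 0).foldl (ecStep cid) (false, 0, "", [])).2.2.2

-- ===== PRECONDITION & SPEC =====
-- Pre_ excludes sequences containing the empty string, on which A's sequence[cur_idx][0] raises IndexError (B raises there too).
def Pre_extract_chunk (sequence : List String) (cid : Int) : Prop := "" ∉ sequence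
instance (sequence : List String) (cid : Int) : Decidable (Pre_extract_chunk sequence cid) := by
  unfold Pre_extract_chunk; infer_instance

def pvWitness_extract_chunk : List String × Int := (["B-a", "I-a", "E-a", "S-b", "O"], 3)

def Spec_extract_chunk (sequence : List String) (cid : Int) (out : List (Int × String × Int × Int)) : Prop := out = extract_chunk_alt sequence cid
instance (sequence : List String) (cid : Int) (out : List (Int × String × Int × Int)) : Decidable (Spec_extract_chunk sequence cid out) := by unfold Spec_extract_chunk; infer_instance

-- ===== CLAIM (what is proved, stated in full; the proofs are below) =====
def Claim_equal_extract_chunk : Prop := ∀ (sequence : List String) (cid : Int), Dom_extract_chunk sequence cid → Pre_extract_chunk sequence cid → Spec_extract_chunk sequence cid (extract_chunk sequence cid)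

-- ===== LEMMAS AND PROOFS =====

theorem ecInner_of_ge (seq : List String) (tag : String) (fuel cur : Nat)
    (h : ¬ cur < seq.length) : ecInner seq tag fuel cur = cur := by
  cases fuel <;> simp [ecInner, h]

theorem ecInner_ge (seq : List String) (tag : String) :
    ∀ fuel cur, cur ≤ ecInner seq tag fuel cur := by
  intro fuel
  induction fuel with
  | zero => intro cur; simp [ecInner]
  | succ f IH =>
    intro cur
    rw [ecInner]
    split_ifs with h h1 h2
    · exact le_trans (by omega) (IH (cur + 1))
    · exact le_refl cur
    · exact le_refl cur
    · exact le_refl cur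

-- the fuel argument is irrelevant as long as it is at least seq.length - cur
theorem ecInner_fuel_irrel (seq : List String) (tag : String) :
    ∀ f1 f2 cur, seq.length - cur ≤ f1 → seq.length - cur ≤ f2 →
      ecInner seq tag f1 cur = ecInner seq tag f2 cur := by
  intro f1
  induction f1 with
  | zero =>
    intro f2 cur h1 _
    have hc : ¬ cur < seq.length := by omega
    rw [ecInner_of_ge seq tag 0 cur hc, ecInner_of_ge seq tag f2 cur hc]
  | succ g IH =>
    intro f2 cur h1 h2
    by_cases hc : cur < seq.length
    · obtain ⟨g2, rfl⟩ : ∃ g2, f2 = g2 + 1 := ⟨f2 - 1, by omega⟩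
      rw [ecInner, ecInner]
      split_ifs with hI hT
      · exact IH g2 (cur + 1) (by omega) (by omega)
      · rfl
      · rfl
    · rw [ecInner_of_ge seq tag _ cur hc, ecInner_of_ge seq tag f2 cur hc]

-- B's foldl from an in-chunk state over the suffix starting at j mirrors A's inner
-- while (ecInner) followed by A's 'E' check.
theorem ec_inchunk (seq : List String) (cid : Int) (tag : String) (start : Int) :
    ∀ (fuel j : Nat) (chunks : List (Int × String × Int × Int)), seq.length - j ≤ fuel →
    ((PySem.List.enumerate (seq.drop j) (j : Int)).foldl (ecStep cid)
        (true, start, tag, chunks)).2.2.2 =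
      (if h2 : ecInner seq tag fuel j < seq.length then
         if ecHead seq[ecInner seq tag fuel j] = some 'E' ∧
             ecTag seq[ecInner seq tag fuel j] = tag then
           ((PySem.List.enumerate (seq.drop (ecInner seq tag fuel j + 1))
               ((ecInner seq tag fuel j + 1 : Nat) : Int)).foldl (ecStep cid)
             (false, start, tag,
              PySem.Set.add chunks (cid, tag, start, (ecInner seq tag fuel j : Int)))).2.2.2
         else
           ((PySem.List.enumerate (seq.drop (ecInner seq tag fuel j))
               ((ecInner seq tag fuel j : Nat) : Int)).foldl (ecStep cid)
             (false, start, tag, chunks)).2.2.2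
       else
         ((PySem.List.enumerate (seq.drop (ecInner seq tag fuel j))
             ((ecInner seq tag fuel j : Nat) : Int)).foldl (ecStep cid)
           (false, start, tag, chunks)).2.2.2) := by
  intro fuel
  induction fuel with
  | zero =>
    intro j chunks hf
    have hj : ¬ j < seq.length := by omega
    have hstop : ecInner seq tag 0 j = j := by simp [ecInner]
    have hnil : seq.drop j = [] := List.drop_eq_nil_of_le (by omega)
    rw [hstop, dif_neg hj, hnil]
    simp [PySem.List.enumerate_nil]
  | succ f IH =>
    intro j chunks hf
    by_cases hj : j < seq.length
    · have hdrop : seq.drop j = seq[j] :: seq.drop (j + 1) := List.drop_eq_getElem_cons hj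
      have hcast : ((j : Int) + 1) = (((j + 1 : Nat)) : Int) := by push_cast; ring
      by_cases hI : ecHead seq[j] = some 'I' ∧ ecTag seq[j] = tag
      · have hin : ecInner seq tag (f + 1) j = ecInner seq tag f (j + 1) := by
          rw [ecInner]; simp [hj, hI.1, hI.2]
        have hs : ecStep cid (true, start, tag, chunks) ((j : Int), seq[j]) =
            (true, start, tag, chunks) := by
          simp [ecStep, hI.1, hI.2]
        rw [hdrop, PySem.List.enumerate_cons, List.foldl_cons, hs, hcast, hin]
        exact IH (j + 1) chunks (by omega)
      · have hstop : ecInner seq tag (f + 1) j = j := by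
          rw [ecInner]
          simp only [dif_pos hj]
          split_ifs with h1 h2
          · exact absurd ⟨h1, h2⟩ hI
          · rfl
          · rfl
        rw [hstop]
        by_cases hE : ecHead seq[j] = some 'E' ∧ ecTag seq[j] = tag
        · have hs : ecStep cid (true, start, tag, chunks) ((j : Int), seq[j]) =
              (false, start, tag, PySem.Set.add chunks (cid, tag, start, (j : Int))) := by
            simp [ecStep, hE.1, hE.2]
          rw [hdrop, PySem.List.enumerate_cons, List.foldl_cons, hs, hcast,
            dif_pos hj, if_pos hE]
        · have hsT : ecStep cid (true, start, tag, chunks) ((j : Int), seq[j]) =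
              ecEnter cid (j : Int) seq[j] start tag chunks := by
            simp [ecStep, hI, hE]
          have hsF : ecStep cid (false, start, tag, chunks) ((j : Int), seq[j]) =
              ecEnter cid (j : Int) seq[j] start tag chunks := by
            simp [ecStep]
          rw [dif_pos hj, if_neg hE]
          conv_lhs => rw [hdrop, PySem.List.enumerate_cons, List.foldl_cons, hsT]
          conv_rhs => rw [hdrop, PySem.List.enumerate_cons, List.foldl_cons, hsF]
    · have hstop : ecInner seq tag (f + 1) j = j := ecInner_of_ge seq tag _ j hj
      have hnil : seq.drop j = [] := List.drop_eq_nil_of_le (by omega)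
      rw [hstop, dif_neg hj, hnil]
      simp [PySem.List.enumerate_nil]

-- main invariant: A's outer loop from cur equals B's foldl over the suffix from a
-- not-in-chunk state, whatever the (dead) start/tag components hold.
theorem ec_main (seq : List String) (cid : Int) :
    ∀ (fuel cur : Nat) (chunks : List (Int × String × Int × Int)), seq.length - cur ≤ fuel →
    ∀ (start : Int) (tag : String),
    ecLoop seq cid fuel cur chunks =
      ((PySem.List.enumerate (seq.drop cur) (cur : Int)).foldl (ecStep cid)
        (false, start, tag, chunks)).2.2.2 := by
  intro fuel
  induction fuel with
  | zero =>
    intro cur chunks hf start tag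
    have hnil : seq.drop cur = [] := List.drop_eq_nil_of_le (by omega)
    rw [hnil]
    simp [ecLoop]
  | succ f IH =>
    intro cur chunks hf start tag
    by_cases hcur : cur < seq.length
    · have hdrop : seq.drop cur = seq[cur] :: seq.drop (cur + 1) := List.drop_eq_getElem_cons hcur
      have hcast : ((cur : Int) + 1) = (((cur + 1 : Nat)) : Int) := by push_cast; ring
      rw [hdrop, PySem.List.enumerate_cons, List.foldl_cons]
      by_cases hB : ecHead seq[cur] = some 'B'
      · have hs : ecStep cid (false, start, tag, chunks) ((cur : Int), seq[cur]) =
            (true, (cur : Int), ecTag seq[cur], chunks) := by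
          simp [ecStep, ecEnter, hB]
        have hirr : ecInner seq (ecTag seq[cur]) seq.length (cur + 1) =
            ecInner seq (ecTag seq[cur]) f (cur + 1) :=
          ecInner_fuel_irrel seq (ecTag seq[cur]) seq.length f (cur + 1) (by omega) (by omega)
        rw [hs, hcast,
          ec_inchunk seq cid (ecTag seq[cur]) (cur : Int) f (cur + 1) chunks (by omega)]
        rw [ecLoop]
        simp only [dif_pos hcur, if_pos hB, hirr]
        have hge : cur + 1 ≤ ecInner seq (ecTag seq[cur]) f (cur + 1) :=
          ecInner_ge seq (ecTag seq[cur]) f (cur + 1)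
        by_cases h2 : ecInner seq (ecTag seq[cur]) f (cur + 1) < seq.length
        · simp only [dif_pos h2]
          by_cases hE : ecHead seq[ecInner seq (ecTag seq[cur]) f (cur + 1)] = some 'E' ∧
              ecTag seq[ecInner seq (ecTag seq[cur]) f (cur + 1)] = ecTag seq[cur]
          · simp only [if_pos hE]
            rw [hE.2]
            exact IH (ecInner seq (ecTag seq[cur]) f (cur + 1) + 1) _ (by omega)
              (cur : Int) (ecTag seq[cur])
          · simp only [if_neg hE]
            exact IH (ecInner seq (ecTag seq[cur]) f (cur + 1)) chunks (by omega)
              (cur : Int) (ecTag seq[cur])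
        · simp only [dif_neg h2]
          exact IH (ecInner seq (ecTag seq[cur]) f (cur + 1)) chunks (by omega)
            (cur : Int) (ecTag seq[cur])
      · by_cases hS : ecHead seq[cur] = some 'S'
        · have hs : ecStep cid (false, start, tag, chunks) ((cur : Int), seq[cur]) =
              (false, start, tag,
               PySem.Set.add chunks (cid, ecTag seq[cur], (cur : Int), (cur : Int))) := by
            simp [ecStep, ecEnter, hS]
          rw [hs, hcast, ecLoop]
          simp only [dif_pos hcur, if_neg hB, if_pos hS]
          exact IH (cur + 1) _ (by omega) start tag
        · have hs : ecStep cid (false, start, tag, chunks) ((cur : Int), seq[cur]) =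
              (false, start, tag, chunks) := by
            simp [ecStep, ecEnter, hB, hS]
          rw [hs, hcast, ecLoop]
          simp only [dif_pos hcur, if_neg hB, if_neg hS]
          exact IH (cur + 1) chunks (by omega) start tag
    · rw [ecLoop]
      simp [hcur, List.drop_eq_nil_of_le (le_of_not_gt hcur)]

-- ===== VERDICT (by name: the statement is the Claim_ definition above) =====
theorem extract_chunk_spec : Claim_equal_extract_chunk := by
  intro sequence cid _ _
  unfold Spec_extract_chunk extract_chunk extract_chunk_alt
  simpa using ec_main sequence cid sequence.length 0 [] (by omega) 0 ""
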